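-- pv_equiv track=rewrite | github.com/startracex/sherry | sherry/router.py | parse_pattern
-- ===== SOURCE A (Python) =====
-- from typing import Dict, List, Optional
--
-- def parse_pattern(pattern: str) -> List[str]:
--     vs = pattern.split("/")
--     parts: List[str] = []
--     for item in vs:
--         if item != "":
--             parts.append(item)
--             if item[0] == "*":
--                 break
--     return parts
-- ===== SOURCE B (Python) =====
-- from typing import List
--
-- def parse_pattern(pattern: str) -> List[str]:
--     # Character-level tokenizer: build segments directly, no split().
--     parts: List[str] = []
--     seg = ""
--     for ch in pattern:
--         if ch == "/":
--             if seg: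
--                 parts.append(seg)
--                 if seg[0] == "*":
--                     return parts
--             seg = ""
--         else:
--             seg += ch
--     if seg:
--         parts.append(seg)
--     return parts
-- ===== Notes on version B (the rewrite author's own statement) =====
-- stated objective: alternative
-- what changed: Replaces split('/') plus an early-stopping loop over segments by a single character-level tokenizer that builds each segment itself, flushes it at '/' boundaries, and returns as soon as a flushed segment starts with '*'.
import Mathlib
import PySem

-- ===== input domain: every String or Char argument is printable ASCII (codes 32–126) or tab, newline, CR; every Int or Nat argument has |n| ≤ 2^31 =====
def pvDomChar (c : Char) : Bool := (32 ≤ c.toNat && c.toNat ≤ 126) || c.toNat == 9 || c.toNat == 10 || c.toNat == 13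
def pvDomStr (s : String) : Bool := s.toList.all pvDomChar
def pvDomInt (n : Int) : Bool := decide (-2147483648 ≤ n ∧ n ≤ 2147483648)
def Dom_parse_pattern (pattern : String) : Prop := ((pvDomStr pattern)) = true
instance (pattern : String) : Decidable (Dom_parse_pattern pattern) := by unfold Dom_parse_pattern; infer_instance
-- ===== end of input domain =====

-- B replaces split('/') + a loop over segments by one character-level tokenizer (alternative algorithm, same cost).
-- ===== PORT A =====
def parse_pattern_go (vs : List String) (parts : List String) : List String :=
  match vs with
  | [] => parts
  | item :: rest =>
    if item ≠ "" then
      let parts := parts ++ [item]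
      if PySem.Str.pyGet? item 0 = some '*' then parts
      else parse_pattern_go rest parts
    else parse_pattern_go rest parts

-- A: split on "/", then one early-stopping loop appending non-empty items, breaking after a "*"-item
def parse_pattern (pattern : String) : List String :=
  let vs := (PySem.Str.split? pattern "/").getD []   -- sep "/" ≠ "", so split? is always `some`
  parse_pattern_go vs []

-- ===== PORT B =====
-- B: one pass over the characters; `seg` is the current segment, flushed at '/' boundaries;
-- return immediately when a flushed segment starts with '*'; final flush after the loop.
def pp_scan (cs : List Char) (seg : List Char) (parts : List String) : List String :=
  match cs with
  | [] => if seg ≠ [] then parts ++ [String.ofList seg] else parts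
  | c :: rest =>
    if c = '/' then
      if seg ≠ [] then
        let parts := parts ++ [String.ofList seg]
        if seg.head? = some '*' then parts
        else pp_scan rest [] parts
      else pp_scan rest [] parts
    else pp_scan rest (seg ++ [c]) parts

def parse_pattern_alt (pattern : String) : List String :=
  pp_scan pattern.toList [] []

-- ===== PRECONDITION & SPEC =====
def Spec_parse_pattern (pattern : String) (out : List String) : Prop := out = parse_pattern_alt pattern
instance (pattern : String) (out : List String) : Decidable (Spec_parse_pattern pattern out) := by unfold Spec_parse_pattern; infer_instance

-- ===== CLAIM (what is proved, stated in full; the proofs are below) =====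
def Claim_equal_parse_pattern : Prop := ∀ (pattern : String), Dom_parse_pattern pattern → Spec_parse_pattern pattern (parse_pattern pattern)

-- ===== LEMMAS AND PROOFS =====

-- proof-side: split a char list at '/' (forward accumulator), the common denominator of the two ports
def splitC (cs : List Char) (cur : List Char) : List (List Char) :=
  match cs with
  | [] => [cur]
  | c :: rest => if c = '/' then cur :: splitC rest [] else splitC rest (cur ++ [c])

-- proof-side: the truncate-at-first-wildcard shape, on char lists
def ppTrunc (l : List (List Char)) : List String :=
  match l with
  | [] => []
  | p :: rest =>
    if p.head? = some '*' then [String.ofList p] else String.ofList p :: ppTrunc rest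

theorem splitOn_go_single (fuel : Nat) (l cur : List Char) (acc : List (List Char))
    (h : l.length < fuel) :
    PySem.Chars.splitOn.go ['/'] fuel l cur acc = acc.reverse ++ splitC l cur.reverse := by
  induction fuel generalizing l cur acc with
  | zero => omega
  | succ fuel ih =>
    cases l with
    | nil => simp [PySem.Chars.splitOn.go, splitC]
    | cons c rest =>
      by_cases hc : c = '/'
      · have hp : List.isPrefixOf ['/'] (c :: rest) = true := by
          simp [hc, List.isPrefixOf]
        rw [PySem.Chars.splitOn.go, if_pos hp]
        simp only [List.length_cons] at h
        rw [ih _ _ _ (by simpa using Nat.lt_of_succ_lt_succ h)]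
        simp [splitC, hc]
      · have hp : List.isPrefixOf ['/'] (c :: rest) = false := by
          simp only [List.isPrefixOf, Bool.and_true, beq_eq_false_iff_ne, ne_eq]
          exact fun h => hc h.symm
        rw [PySem.Chars.splitOn.go, if_neg (by simp [hp])]
        simp only [List.length_cons] at h
        rw [ih _ _ _ (Nat.lt_of_succ_lt_succ h)]
        simp [splitC, hc]

theorem splitOn_single (s : List Char) :
    PySem.Chars.splitOn s ['/'] = splitC s [] := by
  rw [PySem.Chars.splitOn, splitOn_go_single _ _ _ _ (by omega)]
  rfl

theorem pyGet_zero (p : List Char) :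
    PySem.List.pyGet? p 0 = p.head? := by
  cases p with
  | nil => simp [PySem.List.pyGet?]
  | cons c cs => exact PySem.List.pyGet?_zero_cons ..

theorem ofList_ne_empty (p : List Char) : (String.ofList p ≠ "") ↔ p ≠ [] := by
  constructor
  · intro h hp; exact h (by simp [hp])
  · intro h hs
    apply h
    have := congrArg String.toList hs
    simpa using this

-- A's loop over the split segments equals ppTrunc of the non-empty char segments
theorem go_eq (L : List (List Char)) (acc : List String) :
    parse_pattern_go (L.map String.ofList) acc
      = acc ++ ppTrunc (L.filter (fun p => p ≠ [])) := by
  induction L generalizing acc with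
  | nil => simp [parse_pattern_go, ppTrunc]
  | cons p rest ih =>
    by_cases hp : p = []
    · simp [parse_pattern_go, hp, ih]
    · have hne : (String.ofList p ≠ "") := (ofList_ne_empty p).2 hp
      by_cases hw : p.head? = some '*'
      · simp [parse_pattern_go, hne, PySem.Str.pyGet?, pyGet_zero, hw, ppTrunc, hp]
      · simp [parse_pattern_go, hne, PySem.Str.pyGet?, pyGet_zero, hw, ppTrunc, hp, ih]

-- B's tokenizer equals ppTrunc of the non-empty char segments
theorem scan_eq (cs seg : List Char) (parts : List String) :
    pp_scan cs seg parts
      = parts ++ ppTrunc ((splitC cs seg).filter (fun p => p ≠ [])) := by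
  induction cs generalizing seg parts with
  | nil =>
    by_cases hs : seg = []
    · simp [pp_scan, splitC, hs, ppTrunc]
    · by_cases hw : seg.head? = some '*' <;>
        simp [pp_scan, splitC, hs, ppTrunc, hw]
  | cons c rest ih =>
    by_cases hc : c = '/'
    · by_cases hs : seg = []
      · simp [pp_scan, splitC, hc, hs, ih]
      · by_cases hw : seg.head? = some '*'
        · simp [pp_scan, splitC, hc, hs, hw, ppTrunc]
        · simp [pp_scan, splitC, hc, hs, hw, ppTrunc, ih]
    · simp [pp_scan, splitC, hc, ih]

-- ===== VERDICT (by name: the statement is the Claim_ definition above) =====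
theorem parse_pattern_spec : Claim_equal_parse_pattern := by
  intro pattern _
  unfold Spec_parse_pattern parse_pattern parse_pattern_alt
  have hsplit : PySem.Str.split? pattern "/"
      = some ((splitC pattern.toList []).map String.ofList) := by
    rw [PySem.Str.split?, PySem.Chars.split?]
    simp [splitOn_single]
  rw [hsplit]
  simp only [Option.getD_some]
  rw [go_eq, scan_eq]
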